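-- pv_equiv track=rewrite | github.com/SauravSinha76/scaler | class43/specil_integer.py | check
-- ===== SOURCE A (Python) =====
-- def check(A,B,mid):
--     n = len(A)
--     max_sum = 0
--     sum = 0
--     for i in range(mid):
--         sum += A[i]
--
--     max_sum = sum
--
--     start = 0
--     end = mid
--
--     while end < n:
--
--         sum += (A[end] - A[start])
--
--         max_sum = max(max_sum,sum)
--         start += 1
--         end += 1
--
--
--     if max_sum <= B:
--         return True
--     else:
--         return False
-- ===== SOURCE B (Python) =====
-- def check(A, B, mid):
--     P = [0]
--     for x in A:
--         P.append(P[-1] + x)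
--     n = len(A)
--     best = P[mid] - P[0]
--     for s in range(1, n - mid + 1):
--         best = max(best, P[s + mid] - P[s])
--     return best <= B
-- ===== Notes on version B (the rewrite author's own statement) =====
-- stated objective: alternative
-- what changed: Replaces the rolling sliding-window sum (add A[end], subtract A[start], three mutable loop variables) with a prefix-sum array built in one pass, from which each window sum is a single difference P[s+mid]-P[s] maximised in a second pass.
import Mathlib
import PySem

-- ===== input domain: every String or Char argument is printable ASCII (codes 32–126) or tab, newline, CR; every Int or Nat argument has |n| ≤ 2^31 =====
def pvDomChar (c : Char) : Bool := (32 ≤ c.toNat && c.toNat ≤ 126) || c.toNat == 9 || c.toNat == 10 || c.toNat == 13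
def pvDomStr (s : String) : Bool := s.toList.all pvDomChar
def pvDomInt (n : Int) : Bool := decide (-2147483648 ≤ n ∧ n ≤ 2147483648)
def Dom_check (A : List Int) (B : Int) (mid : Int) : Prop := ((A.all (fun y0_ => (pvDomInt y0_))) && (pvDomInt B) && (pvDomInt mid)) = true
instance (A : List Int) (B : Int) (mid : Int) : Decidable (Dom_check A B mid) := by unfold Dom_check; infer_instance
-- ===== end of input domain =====

-- B replaces A's rolling sliding-window sum with a prefix-sum array and a max over window differences: an alternative decomposition, same cost.

-- ===== PORT A =====
def check (A : List Int) (B : Int) (mid : Int) : Bool :=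
  let n : Int := A.length
  -- for i in range(mid): sum += A[i]
  let sum0 : Int := (PySem.List.pyRange 0 mid 1).foldl (fun s i => s + PySem.List.pyGetD A i 0) 0
  -- max_sum = sum; start = 0; end = mid; while end < n: …  (end runs mid, mid+1, …, n-1)
  let st := (PySem.List.pyRange mid n 1).foldl
      (fun (t : Int × Int × Int) e =>
        let sum' := t.1 + (PySem.List.pyGetD A e 0 - PySem.List.pyGetD A t.2.2 0)
        (sum', max t.2.1 sum', t.2.2 + 1))
      (sum0, sum0, 0)
  if st.2.1 ≤ B then true else false

-- ===== PORT B =====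
def check_alt (A : List Int) (B : Int) (mid : Int) : Bool :=
  -- P = [0]; for x in A: P.append(P[-1] + x)
  let P : List Int := A.foldl (fun p x => p ++ [PySem.List.pyGetD p (-1) 0 + x]) [0]
  let n : Int := A.length
  -- best = P[mid] - P[0]; for s in range(1, n - mid + 1): best = max(best, P[s+mid] - P[s])
  let best0 : Int := PySem.List.pyGetD P mid 0 - PySem.List.pyGetD P 0 0
  let best := (PySem.List.pyRange 1 (n - mid + 1) 1).foldl
      (fun b s => max b (PySem.List.pyGetD P (s + mid) 0 - PySem.List.pyGetD P s 0)) best0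
  decide (best ≤ B)

-- ===== PRECONDITION & SPEC =====
-- Pre_ excludes exactly the inputs where Python A raises IndexError: mid > len(A)
-- (the first loop overruns A) or mid < 0 (start overtakes the list, even for A = []).
def Pre_check (A : List Int) (B : Int) (mid : Int) : Prop := 0 ≤ mid ∧ mid ≤ A.length
instance (A : List Int) (B : Int) (mid : Int) : Decidable (Pre_check A B mid) := by unfold Pre_check; infer_instance
def pvWitness_check : List Int × Int × Int := ([1, -2, 3, 4], 5, 2)
def Spec_check (A : List Int) (B : Int) (mid : Int) (out : Bool) : Prop := out = check_alt A B mid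
instance (A : List Int) (B : Int) (mid : Int) (out : Bool) : Decidable (Spec_check A B mid out) := by unfold Spec_check; infer_instance

-- ===== CLAIM (what is proved, stated in full; the proofs are below) =====
def Claim_equal_check : Prop := ∀ (A : List Int) (B : Int) (mid : Int), Dom_check A B mid → Pre_check A B mid → Spec_check A B mid (check A B mid)

-- ===== LEMMAS AND PROOFS =====

-- prefix sum of the first i elements of A
def pvS (A : List Int) (i : Nat) : Int := (A.take i).sum

-- the running maximum both loops compute: max over s = 0..k of pvS (s+m) - pvS s
def pvM (A : List Int) (m : Nat) : Nat → Int
  | 0 => pvS A m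
  | k + 1 => max (pvM A m k) (pvS A (k + 1 + m) - pvS A (k + 1))

theorem pvS_succ (A : List Int) (i : Nat) (h : i < A.length) :
    pvS A (i + 1) = pvS A i + A.getD i 0 := by
  unfold pvS
  rw [List.take_add_one, List.sum_append, List.getD_eq_getElem?_getD,
      List.getElem?_eq_getElem h]
  simp

-- B's prefix list is the map of pvS over 0..n
theorem buildP_eq (A : List Int) :
    A.foldl (fun p x => p ++ [PySem.List.pyGetD p (-1) 0 + x]) [0]
      = (List.range (A.length + 1)).map (pvS A) := by
  induction A using List.reverseRecOn with
  | nil => simp [pvS]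
  | append_singleton A x ih =>
    rw [List.foldl_append, List.foldl_cons, List.foldl_nil, ih]
    have hne : (List.range (A.length + 1)).map (pvS A) ≠ [] := by simp
    have hlast : PySem.List.pyGetD ((List.range (A.length + 1)).map (pvS A)) (-1) 0
        = pvS A A.length := by
      rw [PySem.List.pyGetD_neg_one _ _ hne, List.getLast_eq_getElem]
      simp [pvS]
    rw [hlast, show (A ++ [x]).length + 1 = (A.length + 1) + 1 by simp,
        List.range_succ (n := A.length + 1), List.map_append, List.map_singleton]
    have h1 : (List.range (A.length + 1)).map (pvS (A ++ [x]))
        = (List.range (A.length + 1)).map (pvS A) := by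
      apply List.map_congr_left
      intro i hi
      rw [List.mem_range] at hi
      simp [pvS, List.take_append_of_le_length (by omega : i ≤ A.length)]
    have h2 : pvS (A ++ [x]) (A.length + 1) = pvS A A.length + x := by
      simp [pvS]
    rw [h1, h2]

-- A's first loop computes the sum of the first m elements
theorem firstLoop_eq (A : List Int) (m : Nat) (hm : m ≤ A.length) :
    (PySem.List.pyRange 0 (m : Int) 1).foldl (fun s i => s + PySem.List.pyGetD A i 0) 0
      = pvS A m := by
  induction m with
  | zero => simp [PySem.List.pyRange_one_eq_nil, pvS]
  | succ k ih =>
    rw [show ((k + 1 : Nat) : Int) = (k : Int) + 1 by push_cast; ring,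
        PySem.List.pyRange_one_succ_right (by omega),
        List.foldl_append, ih (by omega), List.foldl_cons, List.foldl_nil,
        pvS_succ A k (by omega), PySem.List.pyGetD_natCast]

-- A's while loop cut after k iterations (end runs mid .. mid+k-1)
theorem whileLoop_eq (A : List Int) (m k : Nat) (hmk : m + k ≤ A.length) :
    (PySem.List.pyRange (m : Int) ((m : Int) + (k : Int)) 1).foldl
      (fun (t : Int × Int × Int) e =>
        let sum' := t.1 + (PySem.List.pyGetD A e 0 - PySem.List.pyGetD A t.2.2 0)
        (sum', max t.2.1 sum', t.2.2 + 1))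
      (pvS A m, pvS A m, 0)
    = (pvS A (k + m) - pvS A k, pvM A m k, (k : Int)) := by
  induction k with
  | zero => simp [PySem.List.pyRange_one_eq_nil, pvM, pvS]
  | succ k ih =>
    rw [show ((k + 1 : Nat) : Int) = (k : Int) + 1 by push_cast; ring,
        show (m : Int) + ((k : Int) + 1) = ((m : Int) + (k : Int)) + 1 by ring,
        PySem.List.pyRange_one_succ_right (by omega),
        List.foldl_append, ih (by omega), List.foldl_cons, List.foldl_nil]
    show (_, max _ _, _) = _
    have h1 : PySem.List.pyGetD A ((m : Int) + (k : Int)) 0 = A.getD (m + k) 0 := by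
      rw [show (m : Int) + (k : Int) = ((m + k : Nat) : Int) by push_cast; ring,
          PySem.List.pyGetD_natCast]
    have h2 : PySem.List.pyGetD A ((k : Nat) : Int) 0 = A.getD k 0 :=
      PySem.List.pyGetD_natCast ..
    have e1 : pvS A (k + m) - pvS A k + (A.getD (m + k) 0 - A.getD k 0)
        = pvS A (k + 1 + m) - pvS A (k + 1) := by
      rw [show k + 1 + m = (k + m) + 1 by ring,
          pvS_succ A (k + m) (by omega), pvS_succ A k (by omega),
          show m + k = k + m by ring]
      ring
    rw [h1, h2, e1]
    refine Prod.ext rfl (Prod.ext rfl ?_)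
    show (k : Int) + 1 = ((k + 1 : Nat) : Int)
    push_cast; ring

-- indexing into the prefix list is pvS, for 0 ≤ k ≤ n
theorem pyGetD_prefix (A : List Int) (k : Nat) (h1 : k ≤ A.length) :
    PySem.List.pyGetD ((List.range (A.length + 1)).map (pvS A)) ((k : Nat) : Int) 0 = pvS A k := by
  rw [PySem.List.pyGetD_natCast, List.getD_eq_getElem?_getD]
  simp [List.getElem?_map, List.getElem?_range (by omega : k < A.length + 1)]

-- B's max loop cut after k iterations (s runs 1 .. k)
theorem bLoop_eq (A : List Int) (m : Nat) (k : Nat) (hmk : m + k ≤ A.length) :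
    (PySem.List.pyRange 1 (1 + (k : Int)) 1).foldl
      (fun b s => max b (PySem.List.pyGetD ((List.range (A.length + 1)).map (pvS A)) (s + (m : Int)) 0
                        - PySem.List.pyGetD ((List.range (A.length + 1)).map (pvS A)) s 0))
      (pvS A m)
    = pvM A m k := by
  induction k with
  | zero => simp [PySem.List.pyRange_one_eq_nil, pvM]
  | succ k ih =>
    rw [show (1 + ((k + 1 : Nat) : Int)) = (1 + (k : Int)) + 1 by push_cast; ring,
        PySem.List.pyRange_one_succ_right (by omega),
        List.foldl_append, ih (by omega), List.foldl_cons, List.foldl_nil]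
    have h1 : PySem.List.pyGetD ((List.range (A.length + 1)).map (pvS A)) ((1 + (k : Int)) + (m : Int)) 0
        = pvS A (k + 1 + m) := by
      rw [show (1 + (k : Int)) + (m : Int) = ((k + 1 + m : Nat) : Int) by push_cast; ring]
      exact pyGetD_prefix A _ (by omega)
    have h2 : PySem.List.pyGetD ((List.range (A.length + 1)).map (pvS A)) (1 + (k : Int)) 0
        = pvS A (k + 1) := by
      rw [show (1 + (k : Int)) = ((k + 1 : Nat) : Int) by push_cast; ring]
      exact pyGetD_prefix A _ (by omega)
    rw [h1, h2]
    rfl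

-- ===== VERDICT (by name: the statement is the Claim_ definition above) =====
theorem check_spec : Claim_equal_check := by
  intro A B mid _ hpre
  obtain ⟨h0, h1⟩ := hpre
  obtain ⟨m, rfl⟩ : ∃ m : Nat, mid = (m : Int) := ⟨mid.toNat, by omega⟩
  have hm : m ≤ A.length := by exact_mod_cast h1
  unfold Spec_check
  simp only [check, check_alt, buildP_eq]
  rw [firstLoop_eq A m hm]
  rw [show (A.length : Int) = (m : Int) + ((A.length - m : Nat) : Int) by omega,
      whileLoop_eq A m (A.length - m) (by omega)]
  have hz := pyGetD_prefix A 0 (by omega)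
  rw [Nat.cast_zero] at hz
  rw [pyGetD_prefix A m hm, hz, show pvS A 0 = 0 from rfl, sub_zero]
  rw [show ((m : Int) + ((A.length - m : Nat) : Int) - (m : Int) + 1) = 1 + ((A.length - m : Nat) : Int) by ring,
      bLoop_eq A m (A.length - m) (by omega)]
  simp
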